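-- pv_equiv track=rewrite | github.com/xenmayer/wgtray | .github/skills/aif-skill-generator/scripts/security-scan.py | build_code_block_ranges
-- ===== SOURCE A (Python) =====
-- def build_code_block_ranges(content: str) -> list:
--     """Find line ranges that are inside fenced code blocks (```...```) in markdown.
--     Returns list of (start_line, end_line) tuples (1-indexed, inclusive)."""
--     ranges = []
--     lines = content.split('\n')
--     in_block = False
--     block_start = 0
--     for i, line in enumerate(lines, 1):
--         stripped = line.strip()
--         if stripped.startswith('```'):
--             if not in_block:
--                 in_block = True
--                 block_start = i
--             else:
--                 in_block = False
--                 ranges.append((block_start, i))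
--     # Unclosed code block — treat rest as code block
--     if in_block:
--         ranges.append((block_start, len(lines)))
--     return ranges
-- ===== SOURCE B (Python) =====
-- def _pair_fences(fences, nlines):
--     """Pair consecutive fence line numbers; a trailing unpaired fence closes at EOF."""
--     ranges = []
--     while len(fences) >= 2:
--         ranges.append((fences[0], fences[1]))
--         fences = fences[2:]
--     if fences:
--         ranges.append((fences[0], nlines))
--     return ranges
--
--
-- def build_code_block_ranges(content: str) -> list:
--     """Find line ranges that are inside fenced code blocks (```...```) in markdown.
--     Returns list of (start_line, end_line) tuples (1-indexed, inclusive)."""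
--     lines = content.split('\n')
--     fences = [i for i, line in enumerate(lines, 1)
--               if line.strip().startswith('```')]
--     return _pair_fences(fences, len(lines))
-- ===== Notes on version B (the rewrite author's own statement) =====
-- stated objective: alternative
-- what changed: Replaces A's single stateful toggle loop (in_block flag + block_start carried across the scan) with a two-phase decomposition: first collect all 1-indexed fence line numbers in one comprehension, then pair them off two at a time, closing a trailing unpaired fence at len(lines).
import Mathlib
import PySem

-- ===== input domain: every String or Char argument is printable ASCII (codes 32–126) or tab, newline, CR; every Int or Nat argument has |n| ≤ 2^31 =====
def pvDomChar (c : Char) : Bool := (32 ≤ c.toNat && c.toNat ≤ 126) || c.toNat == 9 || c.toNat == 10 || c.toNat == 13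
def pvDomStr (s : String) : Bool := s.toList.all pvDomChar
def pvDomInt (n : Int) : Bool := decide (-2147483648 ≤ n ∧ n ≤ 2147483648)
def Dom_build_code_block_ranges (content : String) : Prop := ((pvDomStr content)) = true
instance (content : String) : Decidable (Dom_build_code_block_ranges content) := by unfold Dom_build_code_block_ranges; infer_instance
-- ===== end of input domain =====

-- B differs from A by decomposition only (collect fence indices, then pair them) — same O(n) cost, no speed claim.

-- ===== PORT A =====
def build_code_block_ranges (content : String) : List (Int × Int) :=
  let lines := PySem.Chars.splitOn content.toList ['\n']
  let st := (PySem.List.enumerate lines 1).foldl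
      (fun (s : List (Int × Int) × Bool × Int) (p : Int × List Char) =>
        let stripped := PySem.Chars.strip p.2
        if PySem.Chars.startswith stripped ['`','`','`'] then
          if s.2.1 = false then (s.1, true, p.1)
          else (s.1 ++ [(s.2.2, p.1)], false, s.2.2)
        else s)
      ([], false, 0)
  if st.2.1 then st.1 ++ [(st.2.2, (lines.length : Int))] else st.1

-- ===== PORT B =====
def pvFencePairs (nlines : Int) : List Int → List (Int × Int)
  | [] => []
  | [a] => [(a, nlines)]
  | a :: b :: rest => (a, b) :: pvFencePairs nlines rest

def build_code_block_ranges_alt (content : String) : List (Int × Int) :=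
  let lines := PySem.Chars.splitOn content.toList ['\n']
  let fences := (PySem.List.enumerate lines 1).filterMap
      (fun p => if PySem.Chars.startswith (PySem.Chars.strip p.2) ['`','`','`'] then some p.1 else none)
  pvFencePairs (lines.length : Int) fences

-- ===== PRECONDITION & SPEC =====
def Spec_build_code_block_ranges (content : String) (out : List (Int × Int)) : Prop := out = build_code_block_ranges_alt content
instance (content : String) (out : List (Int × Int)) : Decidable (Spec_build_code_block_ranges content out) := by unfold Spec_build_code_block_ranges; infer_instance

-- ===== CLAIM (what is proved, stated in full; the proofs are below) =====
def Claim_equal_build_code_block_ranges : Prop := ∀ (content : String), Dom_build_code_block_ranges content → Spec_build_code_block_ranges content (build_code_block_ranges content)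

-- ===== LEMMAS AND PROOFS =====

-- the toggle machine of A, restricted to the fence indices only
def pvG : List Int → List (Int × Int) × Bool × Int → List (Int × Int) × Bool × Int
  | [], s => s
  | a :: rest, (acc, false, _) => pvG rest (acc, true, a)
  | a :: rest, (acc, true, bs) => pvG rest (acc ++ [(bs, a)], false, bs)

def pvFinalize (n : Int) (s : List (Int × Int) × Bool × Int) : List (Int × Int) :=
  if s.2.1 then s.1 ++ [(s.2.2, n)] else s.1

theorem pv_foldl_eq_g (pe : List (Int × List Char)) (s : List (Int × Int) × Bool × Int) :
    pe.foldl
      (fun (s : List (Int × Int) × Bool × Int) (p : Int × List Char) =>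
        let stripped := PySem.Chars.strip p.2
        if PySem.Chars.startswith stripped ['`','`','`'] then
          if s.2.1 = false then (s.1, true, p.1)
          else (s.1 ++ [(s.2.2, p.1)], false, s.2.2)
        else s) s
    = pvG (pe.filterMap
        (fun p => if PySem.Chars.startswith (PySem.Chars.strip p.2) ['`','`','`'] then some p.1 else none)) s := by
  induction pe generalizing s with
  | nil => rfl
  | cons p pe ih =>
    obtain ⟨acc, inb, bs⟩ := s
    by_cases h : PySem.Chars.startswith (PySem.Chars.strip p.2) ['`','`','`'] = true
    · cases inb <;> simp [List.foldl_cons, h, ih, pvG]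
    · simp at h
      cases inb <;> simp [List.foldl_cons, h, ih]

theorem pv_g_pairs (n : Int) (f : List Int) :
    ∀ (acc : List (Int × Int)) (bs : Int),
      pvFinalize n (pvG f (acc, true, bs)) = acc ++ pvFencePairs n (bs :: f) ∧
      pvFinalize n (pvG f (acc, false, bs)) = acc ++ pvFencePairs n f := by
  induction f with
  | nil => intro acc bs; simp [pvG, pvFinalize, pvFencePairs]
  | cons a rest ih =>
    intro acc bs
    constructor
    · have := (ih (acc ++ [(bs, a)]) bs).2
      simp [pvG, pvFencePairs, this]
    · have := (ih acc a).1
      simp [pvG, this]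

-- ===== VERDICT (by name: the statement is the Claim_ definition above) =====
theorem build_code_block_ranges_spec : Claim_equal_build_code_block_ranges := by
  intro content _
  unfold Spec_build_code_block_ranges build_code_block_ranges build_code_block_ranges_alt
  simp only [pv_foldl_eq_g]
  have := (pv_g_pairs ((PySem.Chars.splitOn content.toList ['\n']).length : Int)
      ((PySem.List.enumerate (PySem.Chars.splitOn content.toList ['\n']) 1).filterMap
        (fun p => if PySem.Chars.startswith (PySem.Chars.strip p.2) ['`','`','`'] then some p.1 else none))
      [] 0).2
  simpa [pvFinalize] using this
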